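-- pv_equiv track=rewrite | github.com/miliar/Code_Jam_Webscraper | solutions_python/solutions_year16_round0_nr2/1952.py | Maneuver
-- ===== SOURCE A (Python) =====
-- def Maneuver(s):
--     n = len(s)
--
--     res = 0
--     i = 0
--     while i < n:
--         steps = 0
--         while i < n and s[i] == "+":
--             steps += 1
--             i += 1
--         if i == n:
--             return res
--         if steps:
--             res += 1
--         steps = 0
--         while i < n and s[i] == "-":
--             steps += 1
--             i += 1
--         if i == n:
--             return res + 1
--         if steps:
--             res += 1
--     return res
-- ===== SOURCE B (Python) =====
-- def Maneuver(s):
--     flips = sum(1 for a, b in zip(s, s[1:]) if a != b)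
--     if s and s[-1] == '-':
--         flips += 1
--     return flips
-- ===== Notes on version B (the rewrite author's own statement) =====
-- stated objective: simpler
-- what changed: Replaced the nested run-consuming while loops and triple early-return with a single pass counting adjacent differing pairs plus one final check of the last character.
import Mathlib
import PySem

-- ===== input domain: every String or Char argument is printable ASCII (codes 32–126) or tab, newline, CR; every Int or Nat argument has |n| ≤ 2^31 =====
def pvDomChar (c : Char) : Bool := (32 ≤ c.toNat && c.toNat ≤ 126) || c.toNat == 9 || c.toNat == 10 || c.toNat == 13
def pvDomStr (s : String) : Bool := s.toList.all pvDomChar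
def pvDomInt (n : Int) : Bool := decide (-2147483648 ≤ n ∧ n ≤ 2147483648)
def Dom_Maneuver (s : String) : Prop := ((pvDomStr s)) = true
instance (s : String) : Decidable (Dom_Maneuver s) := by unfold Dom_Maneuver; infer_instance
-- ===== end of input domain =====

-- B replaces A's nested run-consuming while loops and triple early-return with a single
-- pass counting adjacent differing pairs plus a final last-character check (objective: simpler).

-- ===== PORT A =====
def pvSkipRun (c : Char) : List Char → Nat × List Char
  | [] => (0, [])
  | x :: xs =>
    if x = c then
      let p := pvSkipRun c xs
      (p.1 + 1, p.2)
    else (0, x :: xs)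

def pvALoop : Nat → List Char → Int → Int
  | 0, _, res => res
  | fuel + 1, l, res =>
    let p := pvSkipRun '+' l
    if p.2 = [] then res
    else
      let res1 := if p.1 ≠ 0 then res + 1 else res
      let q := pvSkipRun '-' p.2
      if q.2 = [] then res1 + 1
      else
        let res2 := if q.1 ≠ 0 then res1 + 1 else res1
        pvALoop fuel q.2 res2


def Maneuver (s : String) : Int := pvALoop (s.toList.length + 1) s.toList 0

-- ===== PORT B =====
def Maneuver_alt (s : String) : Int :=
  let l := s.toList
  let flips := (l.zip (l.drop 1)).foldl (fun acc p => if p.1 ≠ p.2 then acc + 1 else acc) 0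
  if l ≠ [] ∧ l.getLast? = some '-' then flips + 1 else flips

-- ===== PRECONDITION & SPEC =====
-- Pre_ excludes strings containing any character other than '+'/'-': Python A loops forever on them.
def Pre_Maneuver (s : String) : Prop := (s.toList.all (fun c => c == '+' || c == '-')) = true
instance (s : String) : Decidable (Pre_Maneuver s) := by unfold Pre_Maneuver; infer_instance
def pvWitness_Maneuver : String := "+-+--"
def Spec_Maneuver (s : String) (out : Int) : Prop := out = Maneuver_alt s
instance (s : String) (out : Int) : Decidable (Spec_Maneuver s out) := by unfold Spec_Maneuver; infer_instance

-- ===== CLAIM (what is proved, stated in full; the proofs are below) =====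
def Claim_equal_Maneuver : Prop := ∀ (s : String), Dom_Maneuver s → Pre_Maneuver s → Spec_Maneuver s (Maneuver s)

-- ===== LEMMAS AND PROOFS =====

-- the common value: number of adjacent differing pairs, plus 1 if the last char is '-'
def pvG : List Char → Int
  | [] => 0
  | [x] => if x = '-' then 1 else 0
  | x :: y :: t => (if x ≠ y then 1 else 0) + pvG (y :: t)

theorem pvSkipRun_mem (c : Char) : ∀ (l : List Char) (a : Char), a ∈ (pvSkipRun c l).2 → a ∈ l := by
  intro l
  induction l with
  | nil => intro a h; simp [pvSkipRun] at h
  | cons x xs ih =>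
    intro a h
    by_cases hx : x = c
    · simp only [pvSkipRun, if_pos hx] at h
      exact List.mem_cons_of_mem _ (ih a h)
    · simpa [pvSkipRun, hx] using h

theorem pvSkipRun_len (c : Char) : ∀ (l : List Char),
    (pvSkipRun c l).2.length + (pvSkipRun c l).1 = l.length := by
  intro l
  induction l with
  | nil => simp [pvSkipRun]
  | cons x xs ih =>
    by_cases hx : x = c
    · simp only [pvSkipRun, if_pos hx, List.length_cons]; omega
    · simp [pvSkipRun, hx]

theorem pvSkipRun_head (c : Char) : ∀ (l : List Char) (x : Char) (t : List Char),
    (pvSkipRun c l).2 = x :: t → x ≠ c := by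
  intro l
  induction l with
  | nil => intro x t h; simp [pvSkipRun] at h
  | cons y ys ih =>
    intro x t h
    by_cases hy : y = c
    · simp only [pvSkipRun, if_pos hy] at h
      exact ih x t h
    · simp [pvSkipRun, hy] at h
      rw [← h.1]; exact hy

theorem pvG_skipRun (c : Char) : ∀ (l : List Char),
    pvG l = (if (pvSkipRun c l).1 = 0 then pvG (pvSkipRun c l).2
             else if (pvSkipRun c l).2 = [] then (if c = '-' then 1 else 0)
             else 1 + pvG (pvSkipRun c l).2) := by
  intro l
  induction l with
  | nil => simp [pvSkipRun, pvG]
  | cons x t ih =>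
    by_cases hx : x = c
    · subst hx
      simp only [pvSkipRun]
      cases t with
      | nil => simp [pvSkipRun, pvG]
      | cons y ys =>
        by_cases hy : y = x
        · subst hy
          have hgg : pvG (y :: y :: ys) = pvG (y :: ys) := by simp [pvG]
          simp only [pvSkipRun, if_true, Nat.succ_ne_zero, if_false] at ih ⊢
          rw [hgg]
          exact ih
        · simp [pvSkipRun, pvG, hy, Ne.symm hy]
    · simp [pvSkipRun, hx]

theorem pvALoop_eq : ∀ (fuel : Nat) (l : List Char) (res : Int),
    (∀ c ∈ l, c = '+' ∨ c = '-') → l.length < fuel → pvALoop fuel l res = res + pvG l := by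
  intro fuel
  induction fuel with
  | zero => intro l res _ h; omega
  | succ n ih =>
    intro l res hpm hlen
    have hGp := pvG_skipRun '+' l
    have hlenp := pvSkipRun_len '+' l
    cases hr : (pvSkipRun '+' l).2 with
    | nil =>
      have hG0 : pvG l = 0 := by
        rw [hr] at hGp
        by_cases h0 : (pvSkipRun '+' l).1 = 0 <;> simp [h0, pvG] at hGp <;> simp [hGp]
      simp [pvALoop, hr, hG0]
    | cons x t =>
      have hx : x ≠ '+' := pvSkipRun_head '+' l x t hr
      have hxm : x = '-' := by
        have := hpm x (pvSkipRun_mem '+' l x (by rw [hr]; exact List.mem_cons_self ..))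
        tauto
      have hGl : pvG l = (if (pvSkipRun '+' l).1 ≠ 0 then 1 else 0) + pvG (x :: t) := by
        rw [hr] at hGp
        by_cases h0 : (pvSkipRun '+' l).1 = 0 <;> simp [h0] at hGp ⊢ <;> omega
      have hGq := pvG_skipRun '-' (x :: t)
      have hlenq := pvSkipRun_len '-' (x :: t)
      have hm : (pvSkipRun '-' (x :: t)).1 ≠ 0 := by
        subst hxm
        simp [pvSkipRun]
      cases hs : (pvSkipRun '-' (x :: t)).2 with
      | nil =>
        have hG1 : pvG (x :: t) = 1 := by
          rw [hs] at hGq; simpa [hm] using hGq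
        simp [pvALoop, hr, hs]
        rw [hGl, hG1]
        split_ifs <;> omega
      | cons y u =>
        have hGxt : pvG (x :: t) = 1 + pvG (y :: u) := by
          rw [hs] at hGq; simpa [hm] using hGq
        have hpm2 : ∀ c ∈ (y :: u), c = '+' ∨ c = '-' := by
          intro c hc
          have h1 : c ∈ x :: t := pvSkipRun_mem '-' (x :: t) c (by rw [hs]; exact hc)
          exact hpm c (pvSkipRun_mem '+' l c (by rw [hr]; exact h1))
        have hlen2 : (y :: u).length < n := by
          rw [hs] at hlenq
          rw [hr] at hlenp
          omega
        have hrec := ih (y :: u) (if (pvSkipRun '-' (x :: t)).1 = 0 then (if (pvSkipRun '+' l).1 = 0 then res else res + 1) else (if (pvSkipRun '+' l).1 = 0 then res else res + 1) + 1) hpm2 hlen2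
        simp [pvALoop, hr, hs]
        rw [hrec, hGl, hGxt]
        split_ifs <;> omega

-- B's fold with a shifted accumulator
theorem pvFold_shift (xs : List (Char × Char)) : ∀ (a : Int),
    xs.foldl (fun acc p => if p.1 ≠ p.2 then acc + 1 else acc) a
      = a + xs.foldl (fun acc p => if p.1 ≠ p.2 then acc + 1 else acc) 0 := by
  induction xs with
  | nil => intro a; simp
  | cons p t ih =>
    intro a
    simp only [List.foldl_cons]
    rw [ih (if p.1 ≠ p.2 then a + 1 else a), ih (if p.1 ≠ p.2 then (0:Int) + 1 else 0)]
    split_ifs <;> ring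

theorem pvAlt_eq_pvG (s : String) : Maneuver_alt s = pvG s.toList := by
  unfold Maneuver_alt
  generalize s.toList = l
  induction l with
  | nil => simp [pvG]
  | cons x t ih =>
    cases t with
    | nil => simp [pvG]
    | cons y u =>
      simp only [List.drop_one, List.tail_cons, List.zip_cons_cons, List.foldl_cons,
        List.drop_succ_cons, List.drop_zero] at ih ⊢
      rw [pvFold_shift]
      have hlast : (x :: y :: u).getLast? = (y :: u).getLast? := by
        simp [List.getLast?_cons_cons]
      rw [hlast]
      simp only [pvG]
      simp only [ne_eq, reduceCtorEq, not_false_eq_true, true_and] at ih ⊢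
      split_ifs at ih ⊢ <;> omega

-- ===== VERDICT (by name: the statement is the Claim_ definition above) =====
theorem Maneuver_spec : Claim_equal_Maneuver := by
  intro s _ hpre
  have h : ∀ c ∈ s.toList, c = '+' ∨ c = '-' := by
    intro c hc
    have := List.all_eq_true.mp hpre c hc
    simpa using this
  unfold Spec_Maneuver Maneuver
  rw [pvAlt_eq_pvG, pvALoop_eq (s.toList.length + 1) s.toList 0 h (by omega)]
  ring
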